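-- pv_equiv track=rewrite | github.com/huginngri/Timaverkefni | Timi11/V5.py | game_of_eights
-- ===== SOURCE A (Python) =====
-- def game_of_eights(a_list):
--     k = 0
--     b = 0
--     for num in a_list:
--         try:
--             int(num)
--         except:
--             return "Error. Please enter only integers."
--     for nums in a_list:
--             b = k
--             k = int(nums)
--             if k == 8 and b == 8:
--                 return True
--     return False
-- ===== SOURCE B (Python) =====
-- def game_of_eights(a_list):
--     vals = []
--     for num in a_list:
--         try:
--             vals.append(int(num))
--         except:
--             return "Error. Please enter only integers."
--     pos = [i for i, v in enumerate(vals) if v == 8]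
--     return any(b - a == 1 for a, b in zip(pos, pos[1:]))
-- ===== Notes on version B (the rewrite author's own statement) =====
-- stated objective: alternative
-- what changed: B builds an index list of the positions holding an 8 and detects two consecutive 8s by a pairwise adjacency-difference pass over that positions table, instead of A's running previous-value state machine.
import Mathlib
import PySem

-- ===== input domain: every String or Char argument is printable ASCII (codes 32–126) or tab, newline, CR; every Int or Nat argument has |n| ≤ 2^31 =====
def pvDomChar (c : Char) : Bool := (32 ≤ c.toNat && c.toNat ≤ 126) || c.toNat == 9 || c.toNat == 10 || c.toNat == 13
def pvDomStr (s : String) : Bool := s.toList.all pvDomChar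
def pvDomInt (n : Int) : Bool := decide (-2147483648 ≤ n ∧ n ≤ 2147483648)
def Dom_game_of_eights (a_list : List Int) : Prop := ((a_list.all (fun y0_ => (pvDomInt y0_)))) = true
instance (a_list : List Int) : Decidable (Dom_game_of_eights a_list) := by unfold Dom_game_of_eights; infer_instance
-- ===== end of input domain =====

-- B replaces A's running previous-value scan by a positions-of-8 index list with a pairwise
-- adjacency-difference pass (objective: alternative decomposition, same O(n) cost).

-- ===== PORT A =====
-- A's first loop ('int(num)' per element) never raises on ints, so it is a no-op on List Int;
-- the second loop tracks previous value b and current k, returning True on k==8 and b==8.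
def gameLoopA (k : Int) : List Int → Bool
  | [] => false
  | n :: rest =>
    let b := k
    let k' := n
    if k' == 8 && b == 8 then true else gameLoopA k' rest

def game_of_eights (a_list : List Int) : Bool := gameLoopA 0 a_list

-- ===== PORT B =====
-- B: vals = [int(num) for num] is the identity on List Int; pos = positions of 8s
-- ([i for i,v in enumerate(vals) if v == 8]); answer = any adjacent pair of positions differs by 1.
def posOf8 (i : Int) : List Int → List Int
  | [] => []
  | v :: rest => if v == 8 then i :: posOf8 (i + 1) rest else posOf8 (i + 1) rest

def game_of_eights_alt (a_list : List Int) : Bool :=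
  let vals := a_list
  let pos := posOf8 0 vals
  (pos.zip pos.tail).any (fun p => p.2 - p.1 == 1)

-- ===== PRECONDITION & SPEC =====
def Spec_game_of_eights (a_list : List Int) (out : Bool) : Prop := out = game_of_eights_alt a_list
instance (a_list : List Int) (out : Bool) : Decidable (Spec_game_of_eights a_list out) := by unfold Spec_game_of_eights; infer_instance

-- ===== CLAIM (what is proved, stated in full; the proofs are below) =====
def Claim_equal_game_of_eights : Prop := ∀ (a_list : List Int), Dom_game_of_eights a_list → Spec_game_of_eights a_list (game_of_eights a_list)

-- ===== LEMMAS AND PROOFS =====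

-- ===== VERDICT (by name: the statement is the Claim_ definition above) =====
-- elements of posOf8 i l are ≥ i
theorem posOf8_ge (l : List Int) (i m : Int) (hm : m ∈ posOf8 i l) : i ≤ m := by
  induction l generalizing i with
  | nil => simp [posOf8] at hm
  | cons v rest ih =>
    simp only [posOf8] at hm
    split at hm
    · rcases List.mem_cons.1 hm with h | h
      · omega
      · have := ih (i+1) h; omega
    · have := ih (i+1) hm; omega

-- adjacency in the 8-positions list (from any start index) ≡ A's previous-value scan from a non-8 state
theorem adj_posOf8 (l : List Int) (i : Int) :
    ((posOf8 i l).zip (posOf8 i l).tail).any (fun p => p.2 - p.1 == 1) = gameLoopA 0 l := by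
  induction l generalizing i with
  | nil => rfl
  | cons v rest ih =>
    by_cases hv : v = 8
    · subst hv
      cases rest with
      | nil => simp [posOf8, gameLoopA]
      | cons w rest' =>
        by_cases hw : w = 8
        · subst hw
          simp [posOf8, gameLoopA]
        · have hA : gameLoopA 0 (8 :: w :: rest') = gameLoopA 0 (w :: rest') := by
            simp [gameLoopA, hw]
          rw [hA, ← ih (i + 1)]
          have hpos : posOf8 i (8 :: w :: rest') = i :: posOf8 (i + 1 + 1) rest' := by
            simp [posOf8, hw]
          have hpos' : posOf8 (i + 1) (w :: rest') = posOf8 (i + 1 + 1) rest' := by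
            simp [posOf8, hw]
          rw [hpos, hpos']
          cases hrest : posOf8 (i + 1 + 1) rest' with
          | nil => simp
          | cons m ms =>
            have hm : i + 1 + 1 ≤ m := posOf8_ge rest' (i+1+1) m (by rw [hrest]; exact List.mem_cons_self ..)
            have : (m - i == 1) = false := by simp; omega
            simp [List.zip, this]
    · have hA : gameLoopA 0 (v :: rest) = gameLoopA 0 rest := by
        cases rest with
        | nil => simp [gameLoopA]
        | cons w rest' => simp [gameLoopA, hv]
      have hpos : posOf8 i (v :: rest) = posOf8 (i + 1) rest := by simp [posOf8, hv]
      rw [hA, hpos, ih]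

theorem game_of_eights_spec : Claim_equal_game_of_eights := by
  intro l _
  unfold Spec_game_of_eights game_of_eights game_of_eights_alt
  exact (adj_posOf8 l 0).symm
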